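-- pv_equiv track=rewrite | github.com/MDiakhate12/edi-parser | modules/worst_case_edi_layer.py | _perspective_approach_POD
-- ===== SOURCE A (Python) =====
-- def _perspective_approach_POD(i: int, port:str, port_codes_sim:list)-> list:
--     l_PODs_Perspective = []
--     for j in range(len(port_codes_sim[i+1:])):
--         if j == len(port_codes_sim[i+1:]) - 1:  # if we're at the end of the list
--             l_PODs_Perspective.append(port_codes_sim[i+1:][j])
--             break
--         current_value = port_codes_sim[i+1:][j]
--         if current_value != port:
--             l_PODs_Perspective.append(current_value)
--         else:
--             break
--     return l_PODs_Perspective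
-- ===== SOURCE B (Python) =====
-- def _perspective_approach_POD(i: int, port: str, port_codes_sim: list) -> list:
--     suffix = port_codes_sim[i+1:]
--     head = suffix[:-1]
--     if port in head:
--         return head[:head.index(port)]
--     return suffix
-- ===== Notes on version B (the rewrite author's own statement) =====
-- stated objective: faster
-- what changed: Replaces the explicit index loop (which recomputes the slice port_codes_sim[i+1:] on every iteration and special-cases the last element) by slicing the suffix once, dropping its last element, and a single membership/index search returning the prefix before the first occurrence of port, else the whole suffix.
import Mathlib
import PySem

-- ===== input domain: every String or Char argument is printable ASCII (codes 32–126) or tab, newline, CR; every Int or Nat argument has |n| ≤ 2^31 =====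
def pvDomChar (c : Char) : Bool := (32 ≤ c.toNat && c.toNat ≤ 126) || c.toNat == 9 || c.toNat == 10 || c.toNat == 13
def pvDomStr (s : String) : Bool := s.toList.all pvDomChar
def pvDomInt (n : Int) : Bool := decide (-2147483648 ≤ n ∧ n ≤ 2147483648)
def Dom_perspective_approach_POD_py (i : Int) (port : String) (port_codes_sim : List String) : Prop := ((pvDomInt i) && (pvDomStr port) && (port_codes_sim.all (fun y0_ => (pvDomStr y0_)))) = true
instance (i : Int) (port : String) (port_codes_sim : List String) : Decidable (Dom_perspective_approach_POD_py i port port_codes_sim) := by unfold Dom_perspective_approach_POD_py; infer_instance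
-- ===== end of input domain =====

-- B replaces A's index loop (with its unconditional append of the last suffix element)
-- by a single slice plus a membership/index search over suffix[:-1]; objective: faster (A re-slices each iteration).

-- ===== PORT A =====
-- A's loop 'for j in range(len(port_codes_sim[i+1:]))' with its two branches and breaks,
-- carried out over the (value-identical) slice computed once.
def podLoopA (suffix : List String) (port : String) (j : Nat) (acc : List String) : List String :=
  if j < suffix.length then
    if j = suffix.length - 1 then
      acc ++ [suffix.getD j ""]                       -- append last element, break
    else
      let current := suffix.getD j ""
      if current ≠ port then
        podLoopA suffix port (j + 1) (acc ++ [current])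
      else
        acc                                            -- break
  else acc
termination_by suffix.length - j

def perspective_approach_POD_py (i : Int) (port : String) (port_codes_sim : List String) : List String :=
  podLoopA (PySem.List.slice port_codes_sim (some (i + 1)) none) port 0 []

-- ===== PORT B =====
def perspective_approach_POD_py_alt (i : Int) (port : String) (port_codes_sim : List String) : List String :=
  let suffix := PySem.List.slice port_codes_sim (some (i + 1)) none
  let head := PySem.List.slice suffix none (some (-1))    -- suffix[:-1]
  if head.contains port then
    match PySem.List.index? head port with
    | some k => head.take k                               -- head[:head.index(port)]
    | none => suffix
  else suffix

-- ===== PRECONDITION & SPEC =====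
def Spec_perspective_approach_POD_py (i : Int) (port : String) (port_codes_sim : List String) (out : List String) : Prop := out = perspective_approach_POD_py_alt i port port_codes_sim
instance (i : Int) (port : String) (port_codes_sim : List String) (out : List String) : Decidable (Spec_perspective_approach_POD_py i port port_codes_sim out) := by unfold Spec_perspective_approach_POD_py; infer_instance

-- ===== CLAIM (what is proved, stated in full; the proofs are below) =====
def Claim_equal_perspective_approach_POD_py : Prop := ∀ (i : Int) (port : String) (port_codes_sim : List String), Dom_perspective_approach_POD_py i port port_codes_sim → Spec_perspective_approach_POD_py i port port_codes_sim (perspective_approach_POD_py i port port_codes_sim)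

-- ===== LEMMAS AND PROOFS =====

-- structural core of A's loop on the remaining suffix
def podCore (port : String) : List String → List String
  | [] => []
  | [x] => [x]
  | x :: y :: rest => if x ≠ port then x :: podCore port (y :: rest) else []

lemma podLoopA_eq_core (s : List String) (port : String) :
    ∀ (j : Nat) (acc : List String), podLoopA s port j acc = acc ++ podCore port (s.drop j) := by
  intro j acc
  induction j, acc using podLoopA.induct s port with
  | case1 acc hlt =>
      rw [podLoopA]
      have hdrop : s.drop (s.length - 1) = [s.getD (s.length - 1) ""] := by
        have h1 : s.drop (s.length - 1 + 1) = [] := by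
          apply List.drop_eq_nil_of_le; omega
        rw [List.drop_eq_getElem_cons hlt, h1, List.getD_eq_getElem s "" hlt]
      simp [hlt, hdrop, podCore]
  | case2 j acc hlt hlast current hne ih =>
      rw [podLoopA]
      have hlt1 : j + 1 < s.length := by omega
      have hne' : s.getD j "" ≠ port := hne
      have hdrop : s.drop j = s.getD j "" :: s.drop (j + 1) := by
        rw [List.drop_eq_getElem_cons hlt, ← List.getD_eq_getElem s "" hlt]
      have hdrop1 : s.drop (j + 1) = s.getD (j+1) "" :: s.drop (j + 2) := by
        rw [List.drop_eq_getElem_cons hlt1, ← List.getD_eq_getElem s "" hlt1]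
      have ih' : podLoopA s port (j + 1) (acc ++ [s.getD j ""]) =
          acc ++ [s.getD j ""] ++ podCore port (s.drop (j + 1)) := ih
      rw [if_pos hlt, if_neg hlast]
      show (if s.getD j "" ≠ port then podLoopA s port (j + 1) (acc ++ [s.getD j ""]) else acc) =
          acc ++ podCore port (s.drop j)
      rw [if_pos hne', ih', hdrop, hdrop1, podCore, if_pos hne']
      simp
  | case3 j acc hlt hlast current hne =>
      rw [podLoopA]
      have hlt1 : j + 1 < s.length := by omega
      have hne' : s.getD j "" = port := by simpa using hne
      have hdrop : s.drop j = s.getD j "" :: s.drop (j + 1) := by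
        rw [List.drop_eq_getElem_cons hlt, ← List.getD_eq_getElem s "" hlt]
      have hdrop1 : s.drop (j + 1) = s.getD (j+1) "" :: s.drop (j + 2) := by
        rw [List.drop_eq_getElem_cons hlt1, ← List.getD_eq_getElem s "" hlt1]
      rw [if_pos hlt, if_neg hlast]
      show (if s.getD j "" ≠ port then podLoopA s port (j + 1) (acc ++ [s.getD j ""]) else acc) =
          acc ++ podCore port (s.drop j)
      rw [if_neg (not_not_intro hne'), hdrop, hdrop1, podCore, if_neg (not_not_intro hne')]
      simp
  | case4 j acc hge =>
      rw [podLoopA]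
      have : s.drop j = [] := by
        apply List.drop_eq_nil_of_le; omega
      simp [hge, this, podCore]

-- B's body on an arbitrary suffix
def altCore (port : String) (s : List String) : List String :=
  if s.dropLast.contains port then
    match PySem.List.index? s.dropLast port with
    | some k => s.dropLast.take k
    | none => s
  else s

lemma altCore_cons_cons (port x y : String) (rest : List String) (hne : x ≠ port) :
    altCore port (x :: y :: rest) = x :: altCore port (y :: rest) := by
  unfold altCore
  have hdl : (x :: y :: rest).dropLast = x :: (y :: rest).dropLast := rfl
  rw [hdl]
  by_cases hm : port ∈ (y :: rest).dropLast
  · obtain ⟨k, hk⟩ := Option.isSome_iff_exists.mp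
      ((PySem.List.index?_isSome_iff _ _).mpr hm)
    rw [PySem.List.index?_cons_of_ne _ hne, hk]
    simp [hm, List.take_succ_cons]
  · have hn : PySem.List.index? ((y :: rest).dropLast) port = none :=
      (PySem.List.index?_eq_none_iff _ _).mpr hm
    rw [PySem.List.index?_cons_of_ne _ hne, hn]
    simp [hm, Ne.symm hne]

lemma podCore_eq_altCore (port : String) (s : List String) : podCore port s = altCore port s := by
  induction s using podCore.induct port with
  | case1 => simp [podCore, altCore]
  | case2 x => simp [podCore, altCore]
  | case3 x y rest hne ih =>
      rw [podCore, if_pos hne, ih, altCore_cons_cons port x y rest hne]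
  | case4 x y rest hx =>
      simp only [ne_eq, not_not] at hx
      subst hx
      rw [podCore]
      unfold altCore
      have hdl : (x :: y :: rest).dropLast = x :: (y :: rest).dropLast := rfl
      rw [hdl, PySem.List.index?_cons_self]
      simp

-- ===== VERDICT (by name: the statement is the Claim_ definition above) =====
theorem perspective_approach_POD_py_spec : Claim_equal_perspective_approach_POD_py := by
  intro i port l _
  unfold Spec_perspective_approach_POD_py perspective_approach_POD_py perspective_approach_POD_py_alt
  rw [podLoopA_eq_core, List.drop_zero, podCore_eq_altCore]
  simp [altCore, PySem.List.slice_to_neg_one]
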